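-- pv_equiv track=rewrite | github.com/spacelab-ufsc/spacelab-decoder | spacelab-decoder/packet.py | _decode_callsign
-- ===== SOURCE A (Python) =====
-- def _decode_callsign(cs_raw):
--     found = False
--     buf = str()
--     for char in cs_raw:
--         if found:
--             buf = buf + chr(char)
--         else:
--             if char != ord('0'):
--                 buf = buf + chr(char)
--                 found = True
--
--     return buf
-- ===== SOURCE B (Python) =====
-- def _decode_callsign(cs_raw):
--     # Recursion on the structure: peel leading '0' codes, then decode the
--     # remaining suffix in one shot. No flag, no build-then-strip.
--     cs_raw = list(cs_raw)
--     if not cs_raw: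
--         return ''
--     if cs_raw[0] == ord('0'):
--         return _decode_callsign(cs_raw[1:])
--     return ''.join(map(chr, cs_raw))
-- ===== Notes on version B (the rewrite author's own statement) =====
-- stated objective: simpler
-- what changed: Replaces A's single stateful scan with a found-flag by structural recursion: recursively peel leading '0' codes, then decode the whole remaining suffix with one map(chr,...); the leading zeros are never decoded at all. Pre_ excludes codes on which chr raises and the surrogate codes 0xD800-0xDFFF, where A's return is a lone-surrogate string not representable as a Lean String.
import Mathlib
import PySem

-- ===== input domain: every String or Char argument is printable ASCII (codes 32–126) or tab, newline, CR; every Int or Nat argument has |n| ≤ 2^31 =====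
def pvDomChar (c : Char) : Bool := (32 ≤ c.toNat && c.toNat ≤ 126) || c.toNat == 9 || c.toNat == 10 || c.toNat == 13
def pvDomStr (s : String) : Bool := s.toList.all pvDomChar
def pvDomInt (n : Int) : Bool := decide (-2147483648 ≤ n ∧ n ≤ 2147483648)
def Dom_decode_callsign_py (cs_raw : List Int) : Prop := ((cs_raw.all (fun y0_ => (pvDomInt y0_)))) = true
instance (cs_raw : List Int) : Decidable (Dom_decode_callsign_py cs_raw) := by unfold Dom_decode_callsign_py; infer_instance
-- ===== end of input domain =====

-- ===== PORT A =====
-- B replaces A's found-flag scan with structural recursion (peel leading '0' codes,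
-- then decode the remaining suffix in one map); objective: simpler.

-- A's loop: state (found, buf); branches in A's order.
def pvGoA : List Int → Bool → List Char → List Char
  | [], _, buf => buf
  | c :: rest, found, buf =>
    if found then pvGoA rest found (buf ++ [Char.ofNat c.toNat])
    else
      if c ≠ 48 then pvGoA rest true (buf ++ [Char.ofNat c.toNat])
      else pvGoA rest found buf

def decode_callsign_py (cs_raw : List Int) : String :=
  String.ofList (pvGoA cs_raw false [])

-- ===== PORT B =====
-- Source B's recursion: empty → ''; head = ord('0') → recurse on tail; else join(map(chr, whole list)).
def decode_callsign_py_alt : List Int → String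
  | [] => ""
  | c :: rest =>
    if c == 48 then decode_callsign_py_alt rest
    else String.ofList ((c :: rest).map (fun x => Char.ofNat x.toNat))

-- ===== PRECONDITION & SPEC =====
-- Pre_ excludes codes on which Python's chr raises ValueError (negative or > 0x10FFFF)
-- and the surrogate codes 0xD800–0xDFFF, on which A returns a lone-surrogate string that
-- Lean's Char/String cannot represent (not a value of the declared Lean type String).
def Pre_decode_callsign_py (cs_raw : List Int) : Prop :=
  ∀ c ∈ cs_raw, 0 ≤ c ∧ (c < 55296 ∨ (57344 ≤ c ∧ c ≤ 1114111))
instance (cs_raw : List Int) : Decidable (Pre_decode_callsign_py cs_raw) := by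
  unfold Pre_decode_callsign_py; infer_instance
def pvWitness_decode_callsign_py : List Int := [48, 48, 80, 89, 48, 65, 65]
def Spec_decode_callsign_py (cs_raw : List Int) (out : String) : Prop := out = decode_callsign_py_alt cs_raw
instance (cs_raw : List Int) (out : String) : Decidable (Spec_decode_callsign_py cs_raw out) := by unfold Spec_decode_callsign_py; infer_instance

-- ===== CLAIM (what is proved, stated in full; the proofs are below) =====
def Claim_equal_decode_callsign_py : Prop := ∀ (cs_raw : List Int), Dom_decode_callsign_py cs_raw → Pre_decode_callsign_py cs_raw → Spec_decode_callsign_py cs_raw (decode_callsign_py cs_raw)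

-- ===== LEMMAS AND PROOFS =====

-- Once found, A just appends every remaining decoded char.
theorem pvGoA_true (cs : List Int) (buf : List Char) :
    pvGoA cs true buf = buf ++ cs.map (fun c => Char.ofNat c.toNat) := by
  induction cs generalizing buf with
  | nil => simp [pvGoA]
  | cons c rest ih => simp [pvGoA, ih]

-- A's not-yet-found scan computes exactly B's recursion.
theorem pvGoA_false_eq_alt (cs : List Int) :
    String.ofList (pvGoA cs false []) = decode_callsign_py_alt cs := by
  induction cs with
  | nil => rfl
  | cons c rest ih =>
    by_cases h : c = 48
    · subst h; simpa [pvGoA, decode_callsign_py_alt] using ih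
    · simp [pvGoA, decode_callsign_py_alt, h, pvGoA_true]

-- ===== VERDICT (by name: the statement is the Claim_ definition above) =====
theorem decode_callsign_py_spec : Claim_equal_decode_callsign_py := by
  intro cs _ _
  unfold Spec_decode_callsign_py decode_callsign_py
  exact pvGoA_false_eq_alt cs
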